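-- pv_equiv track=rewrite | github.com/carlitosrogo/DAA_Juez_Ejercicios_23-24 | Divide_Y_Venceras/Yo_Soy_Tu_Padre/Yo_Soy_Tu_Padre.py | obtenerGeneracion
-- ===== SOURCE A (Python) =====
-- def obtenerGeneracion(idPersona, nGeneracion, low, high):
--     if low > high:
--         return high
--     else:
--         mid = (low + high) // 2
--         if idPersona in nGeneracion[mid]:
--             return mid
--         elif idPersona in nGeneracion[low]:
--             return low
--         elif idPersona in nGeneracion[high]:
--             return high
--         else:
--             return obtenerGeneracion(idPersona, nGeneracion, low + 1, high - 1)
-- ===== SOURCE B (Python) =====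
-- def obtenerGeneracion(idPersona, nGeneracion, low, high):
--     # Iterative two-pointer scan; the midpoint (low+high)//2 is invariant across
--     # A's recursion, so it is checked once up front instead of on every step.
--     if low > high:
--         return high
--     mid = (low + high) // 2
--     if idPersona in nGeneracion[mid]:
--         return mid
--     while low <= high:
--         if idPersona in nGeneracion[low]:
--             return low
--         if idPersona in nGeneracion[high]:
--             return high
--         low += 1
--         high -= 1
--     return high
-- ===== Notes on version B (the rewrite author's own statement) =====
-- stated objective: simpler
-- what changed: Replaces the recursion with an iterative two-pointer while-loop and hoists the invariant midpoint check (mid=(low+high)//2 is unchanged by the low+1/high-1 step) out of the loop so it is tested once instead of every step.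
import Mathlib
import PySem

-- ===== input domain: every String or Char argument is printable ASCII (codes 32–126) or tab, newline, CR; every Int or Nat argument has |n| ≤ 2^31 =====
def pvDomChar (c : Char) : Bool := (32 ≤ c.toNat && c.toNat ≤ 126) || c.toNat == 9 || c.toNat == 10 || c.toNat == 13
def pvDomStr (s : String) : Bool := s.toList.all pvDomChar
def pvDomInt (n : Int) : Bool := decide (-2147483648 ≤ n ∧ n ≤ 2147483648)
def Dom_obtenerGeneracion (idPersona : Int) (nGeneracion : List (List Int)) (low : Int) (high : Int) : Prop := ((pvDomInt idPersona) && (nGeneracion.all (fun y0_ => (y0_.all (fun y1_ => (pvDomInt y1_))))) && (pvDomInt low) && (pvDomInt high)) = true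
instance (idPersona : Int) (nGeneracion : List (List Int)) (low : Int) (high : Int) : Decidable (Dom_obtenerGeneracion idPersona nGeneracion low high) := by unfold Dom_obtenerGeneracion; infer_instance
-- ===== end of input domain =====

-- B replaces A's recursion by an iterative two-pointer loop with the invariant midpoint
-- check hoisted out of the loop; same cost, plainer control flow.

-- ===== PORT A =====
-- literal transliteration of A's recursion; list indexing via PySem.List.pyGetD
-- (the [] default is unreachable under Pre_, where every accessed index is in range)
def obtenerGeneracion (idPersona : Int) (nGeneracion : List (List Int)) (low : Int) (high : Int) : Int :=
  if low > high then high
  else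
    let mid := PySem.Int.floordiv (low + high) 2
    if idPersona ∈ PySem.List.pyGetD nGeneracion mid [] then mid
    else if idPersona ∈ PySem.List.pyGetD nGeneracion low [] then low
    else if idPersona ∈ PySem.List.pyGetD nGeneracion high [] then high
    else obtenerGeneracion idPersona nGeneracion (low + 1) (high - 1)
termination_by (high - low + 1).toNat
decreasing_by omega

-- ===== PORT B =====
-- the while-loop of Source B
def obtenerGeneracionLoop (idPersona : Int) (nGeneracion : List (List Int)) (low : Int) (high : Int) : Int :=
  if low > high then high
  else if idPersona ∈ PySem.List.pyGetD nGeneracion low [] then low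
  else if idPersona ∈ PySem.List.pyGetD nGeneracion high [] then high
  else obtenerGeneracionLoop idPersona nGeneracion (low + 1) (high - 1)
termination_by (high - low + 1).toNat
decreasing_by omega

def obtenerGeneracion_alt (idPersona : Int) (nGeneracion : List (List Int)) (low : Int) (high : Int) : Int :=
  if low > high then high
  else
    let mid := PySem.Int.floordiv (low + high) 2
    if idPersona ∈ PySem.List.pyGetD nGeneracion mid [] then mid
    else obtenerGeneracionLoop idPersona nGeneracion low high

-- ===== PRECONDITION & SPEC =====
-- Pre_ = exactly the inputs on which Python A returns (no IndexError): the trivial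
-- low > high case, pointers inside Python's valid index window [-len, len), or a
-- pointer outside the window but a hit at mid/low/high on the very first step (any
-- deeper step from an out-of-window pointer would already have raised).
def Pre_obtenerGeneracion (idPersona : Int) (nGeneracion : List (List Int)) (low : Int) (high : Int) : Prop :=
  low > high
  ∨ (-(nGeneracion.length : Int) ≤ low ∧ low ≤ high ∧ high < (nGeneracion.length : Int))
  ∨ (low ≤ high ∧ PySem.Raise.InRange nGeneracion.length (PySem.Int.floordiv (low + high) 2) ∧
      (idPersona ∈ PySem.List.pyGetD nGeneracion (PySem.Int.floordiv (low + high) 2) []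
       ∨ (PySem.Raise.InRange nGeneracion.length low ∧
           (idPersona ∈ PySem.List.pyGetD nGeneracion low []
            ∨ (PySem.Raise.InRange nGeneracion.length high ∧ idPersona ∈ PySem.List.pyGetD nGeneracion high [])))))
instance (idPersona : Int) (nGeneracion : List (List Int)) (low : Int) (high : Int) : Decidable (Pre_obtenerGeneracion idPersona nGeneracion low high) := by unfold Pre_obtenerGeneracion; infer_instance

def pvWitness_obtenerGeneracion : Int × List (List Int) × Int × Int := (2, [[1], [2, 3], [4]], 0, 2)

def Spec_obtenerGeneracion (idPersona : Int) (nGeneracion : List (List Int)) (low : Int) (high : Int) (out : Int) : Prop := out = obtenerGeneracion_alt idPersona nGeneracion low high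
instance (idPersona : Int) (nGeneracion : List (List Int)) (low : Int) (high : Int) (out : Int) : Decidable (Spec_obtenerGeneracion idPersona nGeneracion low high out) := by unfold Spec_obtenerGeneracion; infer_instance

-- ===== CLAIM (what is proved, stated in full; the proofs are below) =====
def Claim_equal_obtenerGeneracion : Prop := ∀ (idPersona : Int) (nGeneracion : List (List Int)) (low : Int) (high : Int), Dom_obtenerGeneracion idPersona nGeneracion low high → Pre_obtenerGeneracion idPersona nGeneracion low high → Spec_obtenerGeneracion idPersona nGeneracion low high (obtenerGeneracion idPersona nGeneracion low high)

-- ===== LEMMAS AND PROOFS =====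

-- The midpoint (low+high)//2 is invariant along A's recursion; if its check fails once,
-- A's recursion coincides with B's two-pointer loop.
theorem obtenerGeneracion_eq_loop (idPersona : Int) (nGeneracion : List (List Int)) :
    ∀ (low high : Int),
      idPersona ∉ PySem.List.pyGetD nGeneracion (PySem.Int.floordiv (low + high) 2) [] →
      obtenerGeneracion idPersona nGeneracion low high
        = obtenerGeneracionLoop idPersona nGeneracion low high := by
  intro low high hmid
  induction hn : (high - low + 1).toNat using Nat.strong_induction_on generalizing low high with
  | _ n ih =>
    rw [obtenerGeneracion, obtenerGeneracionLoop]
    by_cases hlh : low > high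
    · simp [hlh]
    · simp only [hlh, if_false]
      rw [if_neg hmid]
      by_cases hl : idPersona ∈ PySem.List.pyGetD nGeneracion low []
      · simp [hl]
      · simp only [hl, if_false]
        by_cases hh : idPersona ∈ PySem.List.pyGetD nGeneracion high []
        · simp [hh]
        · simp only [hh, if_false]
          subst hn
          exact ih ((high - 1) - (low + 1) + 1).toNat (by omega) (low + 1) (high - 1)
            (by have : low + 1 + (high - 1) = low + high := by ring
                rw [this]; exact hmid) rfl

-- ===== VERDICT (by name: the statement is the Claim_ definition above) =====
theorem obtenerGeneracion_spec : Claim_equal_obtenerGeneracion := by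
  intro idPersona nGeneracion low high _ _
  unfold Spec_obtenerGeneracion obtenerGeneracion_alt
  by_cases hlh : low > high
  · rw [obtenerGeneracion]; simp [hlh]
  · simp only [hlh, if_false]
    by_cases hmid : idPersona ∈ PySem.List.pyGetD nGeneracion (PySem.Int.floordiv (low + high) 2) []
    · rw [obtenerGeneracion]; simp only [hlh, if_false]; rw [if_pos hmid, if_pos hmid]
    · simp only [hmid, if_false]
      exact obtenerGeneracion_eq_loop idPersona nGeneracion low high hmid
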